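-- pv_equiv track=rewrite | github.com/Corina2003/Python_Samson_Corina_3A5 | Ex12.py | group_by_rhyme
-- ===== SOURCE A (Python) =====
-- def group_by_rhyme(words):
--     rhyme_groups= {}
--     for word in words:
--         if len(word)>2:
--             rhyme= word[-2:]
--         else:
--             rhyme= word
--         if rhyme not in rhyme_groups:
--             rhyme_groups[rhyme]=[]
--         rhyme_groups[rhyme].append(word)
--     return list(rhyme_groups.values())
-- ===== SOURCE B (Python) =====
-- def group_by_rhyme(words):
--     words = list(words)
--
--     def rhyme_key(w):
--         return w[-2:] if len(w) > 2 else w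
--
--     order = []
--     seen = set()
--     for w in words:
--         k = rhyme_key(w)
--         if k not in seen:
--             seen.add(k)
--             order.append(k)
--     return [[w for w in words if rhyme_key(w) == k] for k in order]
-- ===== Notes on version B (the rewrite author's own statement) =====
-- stated objective: alternative
-- what changed: Replaces A's single-pass dict-of-lists accumulation by a two-phase plan: one pass collects the distinct rhyme keys in first-appearance order (ordered list + seen set), then each group is rebuilt by a filtering comprehension over the words; no dict of growing lists is maintained.
import Mathlib
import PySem

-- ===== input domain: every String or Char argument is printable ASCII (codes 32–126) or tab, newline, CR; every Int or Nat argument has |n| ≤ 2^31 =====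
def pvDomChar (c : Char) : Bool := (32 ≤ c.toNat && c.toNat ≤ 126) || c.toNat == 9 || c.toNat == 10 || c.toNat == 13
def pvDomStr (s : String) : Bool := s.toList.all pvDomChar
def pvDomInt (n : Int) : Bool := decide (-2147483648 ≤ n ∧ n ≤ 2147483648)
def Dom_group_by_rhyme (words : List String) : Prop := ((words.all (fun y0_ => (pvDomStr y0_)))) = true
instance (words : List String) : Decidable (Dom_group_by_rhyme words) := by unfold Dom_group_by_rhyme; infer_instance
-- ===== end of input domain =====

-- B replaces A's one-pass dict-of-lists grouping by a two-phase plan (collect distinct rhyme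
-- keys in first-appearance order, then rebuild each group by filtering the word list); same
-- return value, stated objective: alternative (not faster).


-- ===== PORT A =====
-- literal port of A: fold the words into an insertion-ordered dict rhyme→group, return its values
def group_by_rhyme (words : List String) : List (List String) :=
  (words.foldl
    (fun (rhyme_groups : PySem.Dict String (List String)) (word : String) =>
      let rhyme : String :=
        if PySem.Str.len word > 2 then PySem.Str.slice word (some (-2)) none else word
      -- 'if rhyme not in rhyme_groups: rhyme_groups[rhyme] = []'
      let rhyme_groups :=
        if rhyme_groups.contains rhyme then rhyme_groups else rhyme_groups.insert rhyme []
      -- 'rhyme_groups[rhyme].append(word)'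
      rhyme_groups.insert rhyme (rhyme_groups.getD rhyme [] ++ [word]))
    PySem.Dict.empty).values

-- ===== PORT B =====
def rhyme_key (w : String) : String :=
  if PySem.Str.len w > 2 then PySem.Str.slice w (some (-2)) none else w

-- port of B: pass 1 collects distinct keys in first-appearance order (order list + seen set),
-- pass 2 builds each group by filtering the word list
def group_by_rhyme_alt (words : List String) : List (List String) :=
  let st := words.foldl
    (fun (st : List String × PySem.Set String) (w : String) =>
      let k := rhyme_key w
      if PySem.Set.contains st.2 k then st else (st.1 ++ [k], PySem.Set.add st.2 k))
    ([], PySem.Set.empty)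
  st.1.map (fun k => words.filter (fun w => rhyme_key w == k))

-- ===== PRECONDITION & SPEC =====
def Spec_group_by_rhyme (words : List String) (out : List (List String)) : Prop := out = group_by_rhyme_alt words
instance (words : List String) (out : List (List String)) : Decidable (Spec_group_by_rhyme words out) := by unfold Spec_group_by_rhyme; infer_instance

-- ===== CLAIM (what is proved, stated in full; the proofs are below) =====
def Claim_equal_group_by_rhyme : Prop := ∀ (words : List String), Dom_group_by_rhyme words → Spec_group_by_rhyme words (group_by_rhyme words)

-- ===== LEMMAS AND PROOFS =====

-- A's loop body is exactly 'modify (rhyme_key w) [] (· ++ [w])'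
theorem pvStepA_eq_modify (d : PySem.Dict String (List String)) (w : String) :
    ((fun (rhyme_groups : PySem.Dict String (List String)) (word : String) =>
      let rhyme : String :=
        if PySem.Str.len word > 2 then PySem.Str.slice word (some (-2)) none else word
      let rhyme_groups :=
        if rhyme_groups.contains rhyme then rhyme_groups else rhyme_groups.insert rhyme []
      rhyme_groups.insert rhyme (rhyme_groups.getD rhyme [] ++ [word])) d w)
    = d.modify (rhyme_key w) [] (fun g => g ++ [w]) := by
  show (let rhyme := rhyme_key w
        let d' := if d.contains rhyme then d else d.insert rhyme []
        d'.insert rhyme (d'.getD rhyme [] ++ [w])) = _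
  simp only [PySem.Dict.modify]
  by_cases h : d.contains (rhyme_key w)
  · simp [h]
  · have hc : d.contains (rhyme_key w) = false := by simpa using h
    simp [hc, PySem.Dict.getD_insert_self, PySem.Dict.insert_insert_self,
      PySem.Dict.getD_of_not_contains d ([] : List String) hc]

-- A's result, characterised: groups = per-key filters over the ordered distinct keys
theorem pvA_eq (words : List String) :
    group_by_rhyme words =
      (PySem.Set.ofList (words.map rhyme_key)).map
        (fun k => words.filter (fun w => rhyme_key w == k)) := by
  unfold group_by_rhyme
  have hstep : (words.foldl
      (fun (rhyme_groups : PySem.Dict String (List String)) (word : String) =>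
        let rhyme : String :=
          if PySem.Str.len word > 2 then PySem.Str.slice word (some (-2)) none else word
        let rhyme_groups :=
          if rhyme_groups.contains rhyme then rhyme_groups else rhyme_groups.insert rhyme []
        rhyme_groups.insert rhyme (rhyme_groups.getD rhyme [] ++ [word]))
      PySem.Dict.empty)
      = words.foldl (fun d w => d.modify (rhyme_key w) [] (fun g => g ++ [w])) PySem.Dict.empty := by
    exact PySem.List.foldl_congr_mem words _ _ _ (fun d w _ => pvStepA_eq_modify d w)
  rw [hstep]
  set D := words.foldl (fun d w => d.modify (rhyme_key w) [] (fun g => g ++ [w])) PySem.Dict.empty with hD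
  have hkeys : D.keys = PySem.Set.ofList (words.map rhyme_key) := by
    rw [hD, PySem.Dict.keys_foldl_modify_key words rhyme_key [] (fun _ w => fun g => g ++ [w])]
    simp [PySem.Dict.keys_empty, PySem.Set.update_nil_left]
  have hnd : D.keys.Nodup := by
    rw [hkeys]; exact PySem.Set.nodup_ofList _
  have hget : ∀ k, D.getD k [] = words.filter (fun w => rhyme_key w == k) := by
    intro k
    have : D = (words.map (fun w => (rhyme_key w, w))).foldl
        (fun d p => d.modify p.1 [] (fun g => g ++ [p.2])) PySem.Dict.empty := by
      rw [hD, List.foldl_map]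
    rw [this, PySem.Dict.getD_foldl_modify_append]
    simp [PySem.Dict.getD_empty, List.filter_map, Function.comp_def]
  rw [PySem.Dict.values_eq_map_keys D hnd [], hkeys]
  exact List.map_congr_left (fun k _ => hget k)

-- B's first pass keeps its order list and seen set equal; from a common start s they both
-- end as 'PySem.Set.update s (words.map rhyme_key)'
theorem pvB_fold (words : List String) (s : PySem.Set String) (hs : s.Nodup) :
    words.foldl
      (fun (st : List String × PySem.Set String) (w : String) =>
        let k := rhyme_key w
        if PySem.Set.contains st.2 k then st else (st.1 ++ [k], PySem.Set.add st.2 k))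
      (s, s)
    = (PySem.Set.update s (words.map rhyme_key), PySem.Set.update s (words.map rhyme_key)) := by
  induction words generalizing s with
  | nil => simp [PySem.Set.update]
  | cons w ws ih =>
    simp only [List.foldl_cons, List.map_cons, PySem.Set.update_cons]
    by_cases h : rhyme_key w ∈ s
    · simp only [(PySem.Set.contains_iff s (rhyme_key w)).mpr h, if_pos]
      rw [PySem.Set.add_of_mem h]
      exact ih s hs
    · have hc : PySem.Set.contains s (rhyme_key w) = false := by
        simpa using (fun hh => h ((PySem.Set.contains_iff s (rhyme_key w)).mp hh))
      simp only [hc, if_neg, Bool.false_eq_true, not_false_iff]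
      rw [PySem.Set.add_of_not_mem h]
      exact ih (s ++ [rhyme_key w])
        (by simp [List.nodup_append, hs]
            exact fun a ha hh => h (hh ▸ ha))

-- ===== VERDICT (by name: the statement is the Claim_ definition above) =====
theorem group_by_rhyme_spec : Claim_equal_group_by_rhyme := by
  intro words _
  show group_by_rhyme words = group_by_rhyme_alt words
  rw [pvA_eq]
  unfold group_by_rhyme_alt
  rw [show (([], PySem.Set.empty) : List String × PySem.Set String)
      = ((PySem.Set.empty : PySem.Set String), (PySem.Set.empty : PySem.Set String)) from rfl]
  rw [pvB_fold words PySem.Set.empty (by simp [PySem.Set.empty]),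
    show PySem.Set.update PySem.Set.empty (words.map rhyme_key)
      = PySem.Set.ofList (words.map rhyme_key) from PySem.Set.update_nil_left _]
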